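-- pv_equiv track=rewrite | github.com/aritroCoder/client | client/providers/utils.py | intersect_preserving_order
-- ===== SOURCE A (Python) =====
-- def intersect_preserving_order(values: list[str], allowed: list[str]) -> list[str]:
--     allowed_set = set(allowed)
--     seen: set[str] = set()
--     result: list[str] = []
--     for value in values:
--         if value in allowed_set and value not in seen:
--             seen.add(value)
--             result.append(value)
--     return result
-- ===== SOURCE B (Python) =====
-- def intersect_preserving_order(values: list[str], allowed: list[str]) -> list[str]:
--     first = {v: i for i, v in reversed(list(enumerate(values)))}
--     return sorted(set(values) & set(allowed), key=first.get)
-- ===== Notes on version B (the rewrite author's own statement) =====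
-- stated objective: alternative
-- what changed: B replaces the fused loop with a seen-set and accumulator by set intersection followed by a sort: it maps every value to its first-occurrence index (built in one reversed dict comprehension) and sorts set(values) & set(allowed) by that index, which yields exactly the first-occurrence order.
import Mathlib
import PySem

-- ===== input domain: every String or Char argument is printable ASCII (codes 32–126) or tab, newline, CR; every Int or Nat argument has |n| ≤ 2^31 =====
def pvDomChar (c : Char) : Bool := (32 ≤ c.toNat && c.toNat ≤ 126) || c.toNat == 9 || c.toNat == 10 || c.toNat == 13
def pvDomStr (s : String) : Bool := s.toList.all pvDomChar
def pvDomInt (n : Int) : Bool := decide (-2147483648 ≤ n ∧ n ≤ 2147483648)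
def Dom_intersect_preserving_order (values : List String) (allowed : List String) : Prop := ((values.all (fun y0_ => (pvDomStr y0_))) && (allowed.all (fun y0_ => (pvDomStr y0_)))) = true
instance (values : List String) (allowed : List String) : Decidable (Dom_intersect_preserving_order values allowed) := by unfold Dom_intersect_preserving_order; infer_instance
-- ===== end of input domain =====

-- B keeps no running seen-set: it intersects the two lists as sets and sorts the common
-- elements by their first-occurrence index in `values` (alternative algorithm; same value).

-- ===== PORT A =====
-- one fused loop over `values`, state = (seen, result)
def intersect_preserving_order (values : List String) (allowed : List String) : List String :=
  let allowed_set : PySem.Set String := PySem.Set.ofList allowed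
  (values.foldl
    (fun (st : PySem.Set String × List String) value =>
      if PySem.Set.contains allowed_set value && !(PySem.Set.contains st.1 value) then
        (PySem.Set.add st.1 value, st.2 ++ [value])
      else st)
    (PySem.Set.empty, [])).2

-- ===== PORT B =====
-- Source B: first = {v: i for i, v in reversed(list(enumerate(values)))};
--       return sorted(set(values) & set(allowed), key=first.get)
-- first.get is ported as getD with an unused default (every sorted element is a key of
-- first); sorted over the set is exact because the keys are distinct (no ties).
def intersect_preserving_order_alt (values : List String) (allowed : List String) : List String :=
  let first : PySem.Dict String Int :=
    ((PySem.List.enumerate values 0).reverse).foldl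
      (fun d p => PySem.Dict.insert d p.2 p.1) PySem.Dict.empty
  PySem.List.sorted (PySem.Set.inter (PySem.Set.ofList values) (PySem.Set.ofList allowed))
    (fun v => PySem.Dict.getD first v 0) false

-- ===== PRECONDITION & SPEC =====
def Spec_intersect_preserving_order (values : List String) (allowed : List String) (out : List String) : Prop := out = intersect_preserving_order_alt values allowed
instance (values : List String) (allowed : List String) (out : List String) : Decidable (Spec_intersect_preserving_order values allowed out) := by unfold Spec_intersect_preserving_order; infer_instance

-- ===== CLAIM (what is proved, stated in full; the proofs are below) =====
def Claim_equal_intersect_preserving_order : Prop := ∀ (values : List String) (allowed : List String), Dom_intersect_preserving_order values allowed → Spec_intersect_preserving_order values allowed (intersect_preserving_order values allowed)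

-- ===== LEMMAS AND PROOFS =====

-- membership after Set.add (specific Bool form used by the invariants below)
lemma ipo_contains_add (s : PySem.Set String) (x w : String) :
    PySem.Set.contains (PySem.Set.add s x) w = (PySem.Set.contains s w || w == x) := by
  by_cases h : PySem.Set.contains s x = true
  · have hm : x ∈ s := List.mem_of_elem_eq_true h
    simp [PySem.Set.add, hm, beq_iff_eq]
    rintro rfl; exact hm
  · have hm : x ∉ s := fun hmm => h (List.elem_eq_true_of_mem hmm)
    rcases eq_or_ne w x with rfl | hne
    · simp [PySem.Set.add, hm]
    · simp [PySem.Set.add, hm, hne, beq_eq_false_iff_ne.mpr hne]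

-- Reference recursion: emit v iff v is allowed and not in the processed set d; d tracks ALL processed values.
def ipoRef (f : String → Bool) : List String → PySem.Set String → List String
  | [], _ => []
  | v :: vs, d =>
      if f v && !(PySem.Set.contains d v) then v :: ipoRef f vs (PySem.Set.add d v)
      else ipoRef f vs (PySem.Set.add d v)

-- A's loop equals the reference, provided seen = processed ∩ allowed.
lemma ipo_loopA_eq (f : String → Bool) :
    ∀ (values : List String) (s d : PySem.Set String) (r : List String),
      (∀ v, PySem.Set.contains s v = (PySem.Set.contains d v && f v)) →
      (values.foldl
        (fun (st : PySem.Set String × List String) value =>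
          if f value && !(PySem.Set.contains st.1 value) then
            (PySem.Set.add st.1 value, st.2 ++ [value])
          else st)
        (s, r)).2 = r ++ ipoRef f values d := by
  intro values
  induction values with
  | nil => intro s d r _; simp [ipoRef]
  | cons v vs ih =>
    intro s d r h
    simp only [List.foldl_cons, ipoRef]
    have hs : PySem.Set.contains s v = (PySem.Set.contains d v && f v) := h v
    by_cases hf : f v = true
    · by_cases hd : PySem.Set.contains d v = true
      · have hsv : PySem.Set.contains s v = true := by rw [hs, hd, hf]; rfl
        simp only [hf, hd, hsv, Bool.not_true, Bool.and_false, Bool.false_eq_true, if_false]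
        rw [ih s (PySem.Set.add d v) r ?_]
        intro w
        rw [h w, ipo_contains_add]
        rcases eq_or_ne w v with rfl | hne
        · simp [hf, List.mem_of_elem_eq_true hd]
        · simp [beq_eq_false_iff_ne.mpr hne]
      · have hd' : PySem.Set.contains d v = false := by simpa using hd
        have hsv : PySem.Set.contains s v = false := by rw [hs, hd']; rfl
        simp only [hf, hd', hsv, Bool.not_false, Bool.and_true, Bool.not_false, if_true]
        rw [ih (PySem.Set.add s v) (PySem.Set.add d v) (r ++ [v]) ?_]
        · simp
        · intro w
          rw [ipo_contains_add, ipo_contains_add, h w]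
          rcases eq_or_ne w v with rfl | hne
          · simp [hf]
          · simp [beq_eq_false_iff_ne.mpr hne]
    · have hf' : f v = false := by simpa using hf
      simp only [hf', Bool.false_and, Bool.false_eq_true, if_false]
      rw [ih s (PySem.Set.add d v) r ?_]
      intro w
      rw [h w, ipo_contains_add]
      rcases eq_or_ne w v with rfl | hne
      · simp [hf']
      · simp [beq_eq_false_iff_ne.mpr hne]

-- set(values) filtered equals the reference (dedup-then-filter characterisation)
lemma ipo_dedup_filter_eq (f : String → Bool) :
    ∀ (values : List String) (d : PySem.Set String),
      ((values.foldl PySem.Set.add d).filter f) = d.filter f ++ ipoRef f values d := by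
  intro values
  induction values with
  | nil => intro d; simp [ipoRef]
  | cons v vs ih =>
    intro d
    simp only [List.foldl_cons, ipoRef]
    by_cases hd : PySem.Set.contains d v = true
    · have hmem : v ∈ d := List.mem_of_elem_eq_true hd
      have hadd : PySem.Set.add d v = d := by simp [PySem.Set.add, hmem]
      by_cases hf : f v = true
      · simp only [hf, hd, Bool.not_true, Bool.and_false, Bool.false_eq_true, if_false]
        rw [hadd, ih d]
      · have hf' : f v = false := by simpa using hf
        simp only [hf', Bool.false_and, Bool.false_eq_true, if_false]
        rw [hadd, ih d]
    · have hd' : PySem.Set.contains d v = false := by simpa using hd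
      have hmem : v ∉ d := fun hm => hd (List.elem_eq_true_of_mem hm)
      have hadd : PySem.Set.add d v = d ++ [v] := by simp [PySem.Set.add, hmem]
      by_cases hf : f v = true
      · simp only [hf, hd', Bool.not_false, Bool.and_true, if_true]
        rw [hadd, ih (d ++ [v])]
        simp [List.filter_append, hf]
      · have hf' : f v = false := by simpa using hf
        simp only [hf', Bool.false_and, Bool.false_eq_true, if_false]
        rw [hadd, ih (d ++ [v])]
        simp [List.filter_append, hf']

-- every emitted element comes from the list and was not yet processed
lemma ipoRef_mem (f : String → Bool) :
    ∀ (l : List String) (d : PySem.Set String) (x : String),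
      x ∈ ipoRef f l d → x ∈ l ∧ PySem.Set.contains d x = false := by
  intro l
  induction l with
  | nil => intro d x hx; simp [ipoRef] at hx
  | cons v vs ih =>
    intro d x hx
    by_cases hcond : (f v && !(PySem.Set.contains d v)) = true
    · simp only [ipoRef, hcond, if_true, List.mem_cons] at hx
      rcases hx with rfl | hx
      · refine ⟨List.mem_cons_self .., ?_⟩
        rcases Bool.and_eq_true_iff.mp hcond with ⟨_, h2⟩
        simpa using h2
      · obtain ⟨hmem, hc⟩ := ih (PySem.Set.add d v) x hx
        rw [ipo_contains_add] at hc
        rcases Bool.or_eq_false_iff.mp hc with ⟨hc1, _⟩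
        exact ⟨List.mem_cons_of_mem _ hmem, hc1⟩
    · simp only [ipoRef, hcond] at hx
      obtain ⟨hmem, hc⟩ := ih (PySem.Set.add d v) x hx
      rw [ipo_contains_add] at hc
      rcases Bool.or_eq_false_iff.mp hc with ⟨hc1, _⟩
      exact ⟨List.mem_cons_of_mem _ hmem, hc1⟩

-- the reference output lists values by strictly increasing first-occurrence index
lemma ipoRef_pairwise_idxOf (f : String → Bool) :
    ∀ (l : List String) (d : PySem.Set String),
      (ipoRef f l d).Pairwise (fun a b => l.idxOf a < l.idxOf b) := by
  intro l
  induction l with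
  | nil => intro d; simp [ipoRef]
  | cons v vs ih =>
    intro d
    have htail : (ipoRef f vs (PySem.Set.add d v)).Pairwise
        (fun a b => (v :: vs).idxOf a < (v :: vs).idxOf b) := by
      refine List.Pairwise.imp_of_mem ?_ (ih (PySem.Set.add d v))
      intro a b ha hb hab
      have hanv : a ≠ v := by
        obtain ⟨_, hc⟩ := ipoRef_mem f vs (PySem.Set.add d v) a ha
        rw [ipo_contains_add] at hc
        rcases Bool.or_eq_false_iff.mp hc with ⟨_, h2⟩
        exact beq_eq_false_iff_ne.mp h2
      have hbnv : b ≠ v := by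
        obtain ⟨_, hc⟩ := ipoRef_mem f vs (PySem.Set.add d v) b hb
        rw [ipo_contains_add] at hc
        rcases Bool.or_eq_false_iff.mp hc with ⟨_, h2⟩
        exact beq_eq_false_iff_ne.mp h2
      rw [List.idxOf_cons_ne _ hanv.symm, List.idxOf_cons_ne _ hbnv.symm]
      omega
    by_cases hcond : (f v && !(PySem.Set.contains d v)) = true
    · simp only [ipoRef, hcond, if_true]
      refine List.Pairwise.cons ?_ htail
      intro b hb
      have hbnv : b ≠ v := by
        obtain ⟨_, hc⟩ := ipoRef_mem f vs (PySem.Set.add d v) b hb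
        rw [ipo_contains_add] at hc
        rcases Bool.or_eq_false_iff.mp hc with ⟨_, h2⟩
        exact beq_eq_false_iff_ne.mp h2
      rw [List.idxOf_cons_self, List.idxOf_cons_ne _ hbnv.symm]
      omega
    · simp only [ipoRef, hcond]
      exact htail

-- the dict {v: i for i, v in reversed(list(enumerate(values)))} maps each element of
-- the list to its FIRST-occurrence index (last insertion wins)
lemma ipo_first_getD (xs : List String) :
    ∀ (s : Int) (v : String), v ∈ xs →
      PySem.Dict.getD
        (((PySem.List.enumerate xs s).reverse).foldl
          (fun d p => PySem.Dict.insert d p.2 p.1) PySem.Dict.empty) v 0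
        = s + (xs.idxOf v : Int) := by
  induction xs with
  | nil => intro s v hv; simp at hv
  | cons x xs ih =>
    intro s v hv
    rw [PySem.List.enumerate_cons, List.reverse_cons, List.foldl_append]
    simp only [List.foldl_cons, List.foldl_nil]
    rw [PySem.Dict.getD_insert]
    rcases eq_or_ne v x with rfl | hne
    · rw [if_pos rfl, List.idxOf_cons_self]
      simp
    · rw [if_neg hne]
      have hvxs : v ∈ xs := by
        rcases List.mem_cons.mp hv with rfl | h
        · exact absurd rfl hne
        · exact h
      rw [ih (s + 1) v hvxs, List.idxOf_cons_ne _ hne.symm]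
      push_cast
      ring

-- ===== VERDICT (by name: the statement is the Claim_ definition above) =====
theorem intersect_preserving_order_spec : Claim_equal_intersect_preserving_order := by
  intro values allowed _
  unfold Spec_intersect_preserving_order intersect_preserving_order intersect_preserving_order_alt
  have hA := ipo_loopA_eq (fun v => PySem.Set.contains (PySem.Set.ofList allowed) v)
      values PySem.Set.empty PySem.Set.empty [] (by intro v; simp [PySem.Set.empty])
  simp only at hA
  rw [hA]
  simp only [List.nil_append]
  -- the common set equals A's output
  have hcommon : PySem.Set.inter (PySem.Set.ofList values) (PySem.Set.ofList allowed)
      = ipoRef (fun v => PySem.Set.contains (PySem.Set.ofList allowed) v) values PySem.Set.empty := by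
    have h1 : PySem.Set.inter (PySem.Set.ofList values) (PySem.Set.ofList allowed)
        = (values.foldl PySem.Set.add PySem.Set.empty).filter
            (fun v => PySem.Set.contains (PySem.Set.ofList allowed) v) := rfl
    have h2 := ipo_dedup_filter_eq
        (fun v => PySem.Set.contains (PySem.Set.ofList allowed) v) values PySem.Set.empty
    rw [h1, h2]
    simp [PySem.Set.empty]
  rw [hcommon]
  -- sorting A's output by first-occurrence index leaves it unchanged
  refine PySem.List.sorted_eq_of_perm_of_pairwise_lt _ _ _ (List.Perm.refl _) ?_ |>.symm
  refine List.Pairwise.imp_of_mem ?_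
    (ipoRef_pairwise_idxOf (fun v => PySem.Set.contains (PySem.Set.ofList allowed) v)
      values PySem.Set.empty)
  intro a b ha hb hab
  have hav : a ∈ values :=
    (ipoRef_mem _ values PySem.Set.empty a ha).1
  have hbv : b ∈ values :=
    (ipoRef_mem _ values PySem.Set.empty b hb).1
  rw [ipo_first_getD values 0 a hav, ipo_first_getD values 0 b hbv]
  omega
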